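-- pv_equiv track=rewrite | github.com/Lakshya-Lalotra/codejam | 2021/qualification_round/moons_and_umbrellas.py | solve_with_non_negative_x_y
-- ===== SOURCE A (Python) =====
-- def solve_with_non_negative_x_y(x: int, y: int, string: str) -> int:
--     # observation: no matter how we fill '?'
--     # pair of combining heading and trailing char must appear anyway
--     string = string.replace("?", "")
--     cost = 0
--     cost_mapping = {
--         "CC": 0,
--         "JJ": 0,
--         "CJ": x,
--         "JC": y,
--     }
--     for i in range(len(string) - 1):
--         cost += cost_mapping[string[i: i + 2]]
--
--     return cost
-- ===== SOURCE B (Python) =====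
-- def solve_with_non_negative_x_y(x: int, y: int, string: str) -> int:
--     s = string.replace("?", "")
--     return s.count("CJ") * x + s.count("JC") * y
-- ===== Notes on version B (the rewrite author's own statement) =====
-- stated objective: simpler
-- what changed: Replaces the index loop over two-char slices and the cost-mapping dict by a closed-form expression of two substring count scans ('CJ' and 'JC' never self-overlap, so each count equals the number of such adjacent transitions).
import Mathlib
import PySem

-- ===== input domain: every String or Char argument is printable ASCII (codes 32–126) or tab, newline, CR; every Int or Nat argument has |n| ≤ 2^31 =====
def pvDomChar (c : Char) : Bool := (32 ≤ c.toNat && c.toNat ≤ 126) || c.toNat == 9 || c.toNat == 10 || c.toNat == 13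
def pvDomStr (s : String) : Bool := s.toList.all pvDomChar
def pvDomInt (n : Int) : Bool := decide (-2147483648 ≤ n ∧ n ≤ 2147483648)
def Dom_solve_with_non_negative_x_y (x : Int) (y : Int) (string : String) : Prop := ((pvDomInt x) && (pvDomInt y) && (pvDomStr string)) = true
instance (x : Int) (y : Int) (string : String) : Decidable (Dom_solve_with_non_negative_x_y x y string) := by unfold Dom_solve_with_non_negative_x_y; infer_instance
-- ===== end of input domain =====

-- B replaces A's index loop and cost-mapping dict by two substring-count scans; return values agree on every input where A returns (KeyError inputs are excluded by Pre_).

-- ===== PORT A =====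
-- dict access cost_mapping[pair] raises KeyError when pair is not a key; Pre_ excludes those
-- inputs, so the total stand-in getD 0 is never taken on an admitted input.
def solve_with_non_negative_x_y (x : Int) (y : Int) (string : String) : Int :=
  let s := PySem.Str.replace string "?" ""
  let cost_mapping : PySem.Dict String Int :=
    ((((PySem.Dict.empty).insert "CC" (0 : Int)).insert "JJ" 0).insert "CJ" x).insert "JC" y
  (PySem.List.pyRange 0 (PySem.Str.len s - 1) 1).foldl
    (fun cost i => cost + cost_mapping.getD (PySem.Str.slice s (some i) (some (i + 2))) 0) 0

-- ===== PORT B =====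
def solve_with_non_negative_x_y_alt (x : Int) (y : Int) (string : String) : Int :=
  let s := PySem.Str.replace string "?" ""
  (PySem.Str.count s "CJ" : Int) * x + (PySem.Str.count s "JC" : Int) * y

-- ===== PRECONDITION & SPEC =====
-- Pre_ excludes exactly the inputs on which A raises KeyError: after stripping '?', some
-- adjacent two-char pair is not one of CC/JJ/CJ/JC, i.e. the stripped string has length ≥ 2
-- and contains a character other than 'C'/'J'.
def Pre_solve_with_non_negative_x_y (x : Int) (y : Int) (string : String) : Prop :=
  (string.toList.filter (fun c => !(c == '?'))).length ≤ 1 ∨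
    (string.toList.filter (fun c => !(c == '?'))).all (fun c => c == 'C' || c == 'J') = true
instance (x : Int) (y : Int) (string : String) : Decidable (Pre_solve_with_non_negative_x_y x y string) := by unfold Pre_solve_with_non_negative_x_y; infer_instance

def pvWitness_solve_with_non_negative_x_y : Int × Int × String := (1, 2, "CJ?C")

def Spec_solve_with_non_negative_x_y (x : Int) (y : Int) (string : String) (out : Int) : Prop := out = solve_with_non_negative_x_y_alt x y string
instance (x : Int) (y : Int) (string : String) (out : Int) : Decidable (Spec_solve_with_non_negative_x_y x y string out) := by unfold Spec_solve_with_non_negative_x_y; infer_instance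

-- ===== CLAIM (what is proved, stated in full; the proofs are below) =====
def Claim_equal_solve_with_non_negative_x_y : Prop := ∀ (x : Int) (y : Int) (string : String), Dom_solve_with_non_negative_x_y x y string → Pre_solve_with_non_negative_x_y x y string → Spec_solve_with_non_negative_x_y x y string (solve_with_non_negative_x_y x y string)
-- ===== LEMMAS AND PROOFS =====

-- number of adjacent pairs (u, v) in a character list
def cpPairs (u v : Char) : List Char → Nat
  | a :: b :: t => (if a = u ∧ b = v then 1 else 0) + cpPairs u v (b :: t)
  | _ => 0

theorem cpPairs_cons_ne {u v b : Char} (t : List Char) (h : b ≠ u) :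
    cpPairs u v (b :: t) = cpPairs u v t := by
  cases t with
  | nil => rfl
  | cons c t' => simp [cpPairs, h]

theorem count_go_pair {u v : Char} (huv : u ≠ v) :
    ∀ (fuel : Nat) (l : List Char) (acc : Nat), l.length ≤ fuel →
      PySem.Chars.count.go [u, v] fuel l acc = acc + cpPairs u v l := by
  intro fuel
  induction fuel with
  | zero =>
    intro l acc h
    have hl : l = [] := List.eq_nil_of_length_eq_zero (Nat.le_zero.mp h)
    subst hl
    rw [PySem.Chars.count.go.eq_def]; rfl
  | succ fuel ih =>
    intro l acc h
    match l with
    | [] => rw [PySem.Chars.count.go.eq_def]; rfl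
    | [a] =>
      rw [PySem.Chars.count.go.eq_def]
      have hpre : ([u, v].isPrefixOf [a]) = false := by
        simp only [List.isPrefixOf, Bool.and_false]
      simp only [hpre, Bool.false_eq_true, if_false]
      rw [ih [] acc (by simp)]; rfl
    | a :: b :: t2 =>
      rw [PySem.Chars.count.go.eq_def]
      have hpre : ([u, v].isPrefixOf (a :: b :: t2)) = (u == a && v == b) := by
        simp [List.isPrefixOf]
      simp only [hpre, Bool.and_eq_true, beq_iff_eq]
      split_ifs with hp
      · obtain ⟨ha, hb⟩ := hp
        subst ha; subst hb
        rw [show List.drop [u, v].length (u :: v :: t2) = t2 by simp]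
        rw [ih t2 (acc + 1) (by simp at h ⊢; omega)]
        rw [show cpPairs u v (u :: v :: t2) = 1 + cpPairs u v (v :: t2) by simp [cpPairs]]
        rw [cpPairs_cons_ne t2 (Ne.symm huv)]
        omega
      · rw [ih (b :: t2) acc (by simp at h ⊢; omega)]
        have hcp : cpPairs u v (a :: b :: t2) = cpPairs u v (b :: t2) := by
          have hne : ¬(a = u ∧ b = v) := fun hx => hp ⟨hx.1.symm, hx.2.symm⟩
          simp [cpPairs, hne]
        rw [hcp]

theorem count_pair {u v : Char} (huv : u ≠ v) (l : List Char) :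
    PySem.Chars.count l [u, v] = cpPairs u v l := by
  unfold PySem.Chars.count
  simp only [List.isEmpty_cons, Bool.false_eq_true, if_false]
  simpa using count_go_pair huv l.length l 0 (le_refl _)

def pairCost (x y : Int) (a b : Char) : Int :=
  if a = 'C' ∧ b = 'J' then x else if a = 'J' ∧ b = 'C' then y else 0

theorem lookup_pair (x y : Int) (a b : Char) :
    (((((PySem.Dict.empty).insert "CC" (0 : Int)).insert "JJ" 0).insert "CJ" x).insert "JC" y).getD
      (String.ofList [a, b]) 0 = pairCost x y a b := by
  have hof : ∀ (c d : Char), (String.ofList [a, b] = String.ofList [c, d]) ↔ (a = c ∧ b = d) := by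
    intro c d
    constructor
    · intro hh
      have := congrArg String.toList hh
      simp at this
      exact this
    · rintro ⟨rfl, rfl⟩; rfl
  rw [show ("JC" : String) = String.ofList ['J', 'C'] from rfl,
      show ("CJ" : String) = String.ofList ['C', 'J'] from rfl,
      show ("JJ" : String) = String.ofList ['J', 'J'] from rfl,
      show ("CC" : String) = String.ofList ['C', 'C'] from rfl]
  rw [PySem.Dict.getD_insert, PySem.Dict.getD_insert, PySem.Dict.getD_insert, PySem.Dict.getD_insert]
  simp only [hof, pairCost]
  by_cases h1 : a = 'J' ∧ b = 'C' <;> by_cases h2 : a = 'C' ∧ b = 'J' <;>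
    by_cases h3 : a = 'J' ∧ b = 'J' <;> by_cases h4 : a = 'C' ∧ b = 'C' <;>
    simp_all
  · split_ifs with p q <;> simp_all

theorem slice_two_cons {α : Type} (a : α) (t : List α) (i : Nat) :
    PySem.List.slice (a :: t) (some ((i : Int) + 1)) (some ((i : Int) + 3)) =
    PySem.List.slice t (some (i : Int)) (some ((i : Int) + 2)) := by
  have h1 : ((i : Int) + 1) = ((i + 1 : Nat) : Int) := by push_cast; ring
  have h3 : ((i : Int) + 3) = ((i + 3 : Nat) : Int) := by push_cast; ring
  have h2 : ((i : Int) + 2) = ((i + 2 : Nat) : Int) := by push_cast; ring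
  rw [h1, h3, h2, PySem.List.slice_natCast, PySem.List.slice_natCast]
  simp [List.drop_succ_cons]

theorem slice_two_zero {α : Type} (a b : α) (t : List α) :
    PySem.List.slice (a :: b :: t) (some (0 : Int)) (some (2 : Int)) = [a, b] := by
  rw [show (0 : Int) = ((0 : Nat) : Int) from rfl, show (2 : Int) = ((2 : Nat) : Int) from rfl,
      PySem.List.slice_natCast]
  rfl

theorem fold_cp (x y : Int) : ∀ t : List Char,
    (PySem.List.pyRange 0 ((t.length : Int) - 1) 1).foldl
      (fun cost i => cost +
        (((((PySem.Dict.empty).insert "CC" (0 : Int)).insert "JJ" 0).insert "CJ" x).insert "JC" y).getD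
          (String.ofList (PySem.List.slice t (some i) (some (i + 2)))) 0) 0
    = x * (cpPairs 'C' 'J' t : Int) + y * (cpPairs 'J' 'C' t : Int) := by
  intro t
  induction t with
  | nil =>
    rw [show PySem.List.pyRange 0 ((([] : List Char).length : Int) - 1) 1 = [] from by decide]
    simp [cpPairs]
  | cons a t ih =>
    cases t with
    | nil =>
      rw [show PySem.List.pyRange 0 ((([a] : List Char).length : Int) - 1) 1 = [] from by
        simp]
      simp [cpPairs]
    | cons b t2 =>
      rw [PySem.List.foldl_add] at ih ⊢
      have hlen : ((a :: b :: t2).length : Int) - 1 = ((t2.length + 1 : Nat) : Int) := by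
        simp only [List.length_cons]; push_cast; ring
      rw [hlen, PySem.List.pyRange_zero_natCast, List.range_succ_eq_map]
      simp only [List.map_cons, List.map_map, List.sum_cons, Nat.cast_zero]
      rw [show (PySem.List.slice (a :: b :: t2) (some 0) (some (0 + 2))) =
            PySem.List.slice (a :: b :: t2) (some (0 : Int)) (some (2 : Int)) by norm_num]
      rw [slice_two_zero a b t2, lookup_pair x y a b]
      rw [show ((b :: t2).length : Int) - 1 = ((t2.length : Nat) : Int) by simp,
          PySem.List.pyRange_zero_natCast, List.map_map] at ih
      have hmap :
          List.map
            ((fun i =>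
                ((((PySem.Dict.empty.insert "CC" (0:Int)).insert "JJ" 0).insert "CJ" x).insert "JC" y).getD
                  (String.ofList (PySem.List.slice (a :: b :: t2) (some i) (some (i + 2)))) 0) ∘
              (fun k : Nat => (k : Int)) ∘ Nat.succ)
            (List.range t2.length)
          = List.map
            ((fun i =>
                ((((PySem.Dict.empty.insert "CC" (0:Int)).insert "JJ" 0).insert "CJ" x).insert "JC" y).getD
                  (String.ofList (PySem.List.slice (b :: t2) (some i) (some (i + 2)))) 0) ∘
              (fun k : Nat => (k : Int)))
            (List.range t2.length) := by
        apply List.map_congr_left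
        intro k _
        simp only [Function.comp_apply]
        rw [show ((Nat.succ k : Nat) : Int) = (k : Int) + 1 by push_cast; ring,
            show ((k : Int) + 1) + 2 = (k : Int) + 3 by ring,
            slice_two_cons a (b :: t2) k]
      rw [hmap]
      rw [zero_add] at ih ⊢
      rw [ih]
      have hC : (cpPairs 'C' 'J' (a :: b :: t2) : Int) =
          (if a = 'C' ∧ b = 'J' then 1 else 0) + (cpPairs 'C' 'J' (b :: t2) : Int) := by
        simp [cpPairs]
      have hJ : (cpPairs 'J' 'C' (a :: b :: t2) : Int) =
          (if a = 'J' ∧ b = 'C' then 1 else 0) + (cpPairs 'J' 'C' (b :: t2) : Int) := by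
        simp [cpPairs]
      rw [hC, hJ]
      unfold pairCost
      split_ifs with p q <;> simp_all <;> ring

theorem ports_agree (x y : Int) (string : String) :
    solve_with_non_negative_x_y x y string = solve_with_non_negative_x_y_alt x y string := by
  unfold solve_with_non_negative_x_y solve_with_non_negative_x_y_alt
  simp only [PySem.Str.len_eq, PySem.Str.count_eq, PySem.Str.slice, PySem.Chars.slice_eq_listSlice]
  rw [fold_cp x y (PySem.Str.replace string "?" "").toList]
  rw [show ("CJ" : String).toList = ['C', 'J'] from rfl,
      show ("JC" : String).toList = ['J', 'C'] from rfl]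
  rw [count_pair (by decide) _, count_pair (by decide) _]
  ring

-- ===== VERDICT (by name: the statement is the Claim_ definition above) =====
theorem solve_with_non_negative_x_y_spec : Claim_equal_solve_with_non_negative_x_y := by
  intro x y string _ _
  unfold Spec_solve_with_non_negative_x_y
  exact ports_agree x y string
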